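-- pv_equiv track=rewrite | github.com/sukminc/hero-performance-os | app/api/field_ecology.py | _has_limp_shove
-- ===== SOURCE A (Python) =====
-- def _has_limp_shove(preflop_rows: list[str]) -> bool:
--     actor_state: dict[str, str] = {}
--     for row in preflop_rows:
--         if ":" not in row:
--             continue
--         actor, remainder = row.split(":", 1)
--         remainder = remainder.strip()
--         if remainder.startswith("calls "):
--             actor_state[actor] = "limped"
--         elif remainder.startswith("raises ") and "all-in" in remainder and actor_state.get(actor) == "limped":
--             return True
--         elif remainder.startswith("raises "):
--             actor_state[actor] = "raised"
--     return False
-- ===== SOURCE B (Python) =====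
-- def _classify(row):
--     if ":" not in row:
--         return None
--     actor, remainder = row.split(":", 1)
--     remainder = remainder.strip()
--     if remainder.startswith("calls "):
--         return (actor, "limp")
--     if remainder.startswith("raises "):
--         return (actor, "allin" if "all-in" in remainder else "raise")
--     return None
--
--
-- def _has_limp_shove(preflop_rows: list[str]) -> bool:
--     per_actor: dict[str, list[str]] = {}
--     for row in preflop_rows:
--         parsed = _classify(row)
--         if parsed is None:
--             continue
--         actor, tag = parsed
--         per_actor[actor] = per_actor.get(actor, []) + [tag]
--     for tags in per_actor.values():
--         limped = False
--         for tag in tags: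
--             if tag == "limp":
--                 limped = True
--             elif tag == "allin":
--                 if limped:
--                     return True
--                 limped = False
--             else:
--                 limped = False
--     return False
-- ===== Notes on version B (the rewrite author's own statement) =====
-- stated objective: alternative
-- what changed: Replaces A's single interleaved scan with a shared mutable actor-state dict by a two-phase decomposition: a grouping pass collecting each actor's ordered relevant actions, then an independent per-actor replay with a local boolean state.
import Mathlib
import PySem

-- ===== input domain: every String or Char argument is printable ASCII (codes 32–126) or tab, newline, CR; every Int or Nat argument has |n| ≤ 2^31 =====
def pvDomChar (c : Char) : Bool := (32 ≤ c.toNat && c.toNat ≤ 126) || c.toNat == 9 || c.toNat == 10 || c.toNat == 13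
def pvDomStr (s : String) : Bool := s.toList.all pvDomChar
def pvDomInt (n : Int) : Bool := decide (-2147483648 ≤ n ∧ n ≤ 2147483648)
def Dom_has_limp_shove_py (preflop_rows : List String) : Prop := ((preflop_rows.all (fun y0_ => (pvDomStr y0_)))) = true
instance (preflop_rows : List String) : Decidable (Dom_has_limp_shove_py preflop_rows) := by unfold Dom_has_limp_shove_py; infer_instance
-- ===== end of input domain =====

-- B replaces A's single interleaved scan with one shared state dict by a two-phase
-- decomposition (group each actor's relevant actions, then replay each actor locally);
-- same cost, different structure ("alternative").


-- ===== PORT A =====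
def hlsGo : List String → PySem.Dict String String → Bool
  | [], _ => false
  | row :: rest, st =>
    if !(PySem.Str.isIn ":" row) then hlsGo rest st
    else
      match PySem.Str.splitMax? row ":" 1 with
      | some (actor :: rem0 :: _) =>
        let rem := PySem.Str.strip rem0
        if PySem.Str.startswith rem "calls " then hlsGo rest (st.insert actor "limped")
        else if PySem.Str.startswith rem "raises " && PySem.Str.isIn "all-in" rem
                && (st.get? actor == some "limped") then true
        else if PySem.Str.startswith rem "raises " then hlsGo rest (st.insert actor "raised")
        else hlsGo rest st
      | _ => hlsGo rest st   -- unreachable: ":" ∈ row ⇒ split has exactly 2 parts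

def has_limp_shove_py (preflop_rows : List String) : Bool :=
  hlsGo preflop_rows PySem.Dict.empty

-- ===== PORT B =====
-- port of Source B's _classify helper
def classifyRow (row : String) : Option (String × String) :=
  if !(PySem.Str.isIn ":" row) then none
  else
    match PySem.Str.splitMax? row ":" 1 with
    | some (actor :: rem0 :: _) =>
      let rem := PySem.Str.strip rem0
      if PySem.Str.startswith rem "calls " then some (actor, "limp")
      else if PySem.Str.startswith rem "raises " then
        some (actor, if PySem.Str.isIn "all-in" rem then "allin" else "raise")
      else none
    | _ => none   -- unreachable, as above

-- grouping pass: actor ↦ ordered list of that actor's relevant tags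
def collectStep (d : PySem.Dict String (List String)) (row : String) :
    PySem.Dict String (List String) :=
  match classifyRow row with
  | none => d
  | some (a, t) => d.insert a (d.getD a [] ++ [t])

def collectB (rows : List String) : PySem.Dict String (List String) :=
  rows.foldl collectStep PySem.Dict.empty

-- per-actor replay with a local 'limped' flag
def replayTags : List String → Bool → Bool
  | [], _ => false
  | t :: rest, limped =>
    if t == "limp" then replayTags rest true
    else if t == "allin" then (if limped then true else replayTags rest false)
    else replayTags rest false

def has_limp_shove_py_alt (preflop_rows : List String) : Bool :=
  (collectB preflop_rows).values.any (fun tags => replayTags tags false)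

-- ===== PRECONDITION & SPEC =====
def Spec_has_limp_shove_py (preflop_rows : List String) (out : Bool) : Prop := out = has_limp_shove_py_alt preflop_rows
instance (preflop_rows : List String) (out : Bool) : Decidable (Spec_has_limp_shove_py preflop_rows out) := by unfold Spec_has_limp_shove_py; infer_instance

-- ===== CLAIM (what is proved, stated in full; the proofs are below) =====
def Claim_equal_has_limp_shove_py : Prop := ∀ (preflop_rows : List String), Dom_has_limp_shove_py preflop_rows → Spec_has_limp_shove_py preflop_rows (has_limp_shove_py preflop_rows)

-- ===== LEMMAS AND PROOFS =====

-- the tag subsequence of actor a in rows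
def actsOf (rows : List String) (a : String) : List String :=
  ((rows.filterMap classifyRow).filter (fun p => p.1 == a)).map (·.2)

lemma actsOf_nil (a : String) : actsOf [] a = [] := rfl

lemma replayTags_cons (t : String) (l : List String) (s : Bool) :
    replayTags (t :: l) s =
      if t == "limp" then replayTags l true
      else if t == "allin" then (if s then true else replayTags l false)
      else replayTags l false := by
  rw [replayTags.eq_def]

lemma actsOf_cons (row : String) (rest : List String) (a : String) :
    actsOf (row :: rest) a =
      match classifyRow row with
      | none => actsOf rest a
      | some (b, t) => if b == a then t :: actsOf rest a else actsOf rest a := by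
  unfold actsOf
  cases h : classifyRow row with
  | none => simp [h]
  | some p =>
    obtain ⟨b, t⟩ := p
    by_cases hb : b == a <;> simp [h, hb]

-- A's step, phrased through classifyRow
lemma hlsGo_cons (row : String) (rest : List String) (st : PySem.Dict String String) :
    hlsGo (row :: rest) st =
      match classifyRow row with
      | none => hlsGo rest st
      | some (a, t) =>
        if t == "limp" then hlsGo rest (st.insert a "limped")
        else if t == "allin" then
          (if st.get? a == some "limped" then true else hlsGo rest (st.insert a "raised"))
        else hlsGo rest (st.insert a "raised") := by
  rw [hlsGo.eq_def]
  unfold classifyRow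
  simp only []
  by_cases hin : PySem.Str.isIn ":" row = true
  · rw [hin]
    simp only [Bool.not_true, Bool.false_eq_true, if_false]
    cases hs : PySem.Str.splitMax? row ":" 1 with
    | none => simp
    | some parts =>
      match parts with
      | [] => simp
      | [x] => simp
      | actor :: rem0 :: tail =>
        simp only []
        by_cases hc : PySem.Str.startswith (PySem.Str.strip rem0) "calls " = true
        · rw [hc]; simp
        · rw [Bool.not_eq_true] at hc
          rw [hc]
          by_cases hr : PySem.Str.startswith (PySem.Str.strip rem0) "raises " = true
          · rw [hr]
            by_cases ha : PySem.Str.isIn "all-in" (PySem.Str.strip rem0) = true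
            · rw [ha]
              by_cases hl : (st.get? actor == some "limped") = true
              · simp at hl; simp [hl]
              · simp at hl; simp [hl]
            · rw [Bool.not_eq_true] at ha
              rw [ha]; simp
          · rw [Bool.not_eq_true] at hr
            rw [hr]; simp
  · rw [Bool.not_eq_true] at hin
    rw [hin]
    simp
-- main A-side characterization
lemma hlsGo_iff (rows : List String) (st : PySem.Dict String String) :
    hlsGo rows st = true ↔
      ∃ a, replayTags (actsOf rows a) (st.get? a == some "limped") = true := by
  induction rows generalizing st with
  | nil => simp [hlsGo, actsOf_nil, replayTags]
  | cons row rest ih =>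
    rw [hlsGo_cons]
    cases h : classifyRow row with
    | none =>
      rw [ih]
      refine exists_congr fun a => ?_
      rw [actsOf_cons, h]
    | some p =>
      obtain ⟨b, t⟩ := p
      simp only []
      by_cases hl : (t == "limp") = true
      · rw [if_pos hl, ih]
        refine exists_congr fun a => ?_
        rw [actsOf_cons, h]
        simp only []
        by_cases hb : (b == a) = true
        · have hba : b = a := by simpa using hb
          subst hba
          rw [if_pos hb, PySem.Dict.get?_insert_self]
          simp [replayTags_cons, hl]
        · have hba : a ≠ b := fun hh => by simp [hh] at hb
          rw [if_neg (by simp [hb]), PySem.Dict.get?_insert_of_ne _ _ hba]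
      · by_cases ha : (t == "allin") = true
        · rw [if_neg hl, if_pos ha]
          by_cases hs : (st.get? b == some "limped") = true
          · rw [if_pos hs]
            constructor
            · intro _
              refine ⟨b, ?_⟩
              rw [actsOf_cons, h]
              simp [replayTags_cons, hl, ha, hs]
            · intro _; rfl
          · rw [if_neg hs, ih]
            refine exists_congr fun a => ?_
            rw [actsOf_cons, h]
            simp only []
            by_cases hb : (b == a) = true
            · have hba : b = a := by simpa using hb
              subst hba
              rw [if_pos hb]
              have h2 : ((st.insert b "raised").get? b == some "limped") = false := by
                rw [PySem.Dict.get?_insert_self]; decide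
              rw [h2]
              simp [replayTags_cons, hl, ha, hs]
            · have hba : a ≠ b := fun hh => by simp [hh] at hb
              rw [if_neg (by simp [hb]), PySem.Dict.get?_insert_of_ne _ _ hba]
        · rw [if_neg hl, if_neg ha, ih]
          refine exists_congr fun a => ?_
          rw [actsOf_cons, h]
          simp only []
          by_cases hb : (b == a) = true
          · have hba : b = a := by simpa using hb
            subst hba
            rw [if_pos hb]
            have h2 : ((st.insert b "raised").get? b == some "limped") = false := by
              rw [PySem.Dict.get?_insert_self]; decide
            rw [h2]
            simp [replayTags_cons, hl, ha]
          · have hba : a ≠ b := fun hh => by simp [hh] at hb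
            rw [if_neg (by simp [hb]), PySem.Dict.get?_insert_of_ne _ _ hba]

-- grouping characterization
lemma collect_get? (rows : List String) (g : PySem.Dict String (List String)) (a : String) :
    (rows.foldl collectStep g).get? a =
      match g.get? a with
      | some l => some (l ++ actsOf rows a)
      | none => if actsOf rows a = [] then none else some (actsOf rows a) := by
  induction rows generalizing g with
  | nil =>
    cases hg : g.get? a <;> simp [actsOf_nil, hg]
  | cons row rest ih =>
    rw [List.foldl_cons]
    cases h : classifyRow row with
    | none =>
      rw [show collectStep g row = g from by unfold collectStep; rw [h]]
      rw [ih, actsOf_cons, h]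
    | some p =>
      obtain ⟨b, t⟩ := p
      rw [show collectStep g row = g.insert b (g.getD b [] ++ [t]) from by
        unfold collectStep; rw [h]]
      rw [ih, actsOf_cons, h]
      simp only []
      by_cases hb : (b == a) = true
      · have hba : b = a := by simpa using hb
        subst hba
        rw [PySem.Dict.get?_insert, if_pos rfl, PySem.Dict.getD_eq_get?_getD]
        cases hg : g.get? b <;> simp
      · have hba : a ≠ b := fun hh => by simp [hh] at hb
        have hbeq : (b == a) = false := by simpa using hb
        rw [PySem.Dict.get?_insert, if_neg hba]
        simp only [hbeq, Bool.false_eq_true, if_false]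

lemma collect_nodup (rows : List String) (g : PySem.Dict String (List String))
    (h : g.keys.Nodup) : (rows.foldl collectStep g).keys.Nodup := by
  induction rows generalizing g with
  | nil => exact h
  | cons row rest ih =>
    refine ih _ ?_
    unfold collectStep
    cases classifyRow row with
    | none => exact h
    | some p => exact PySem.Dict.nodup_keys_insert _ _ _ h

lemma alt_iff (rows : List String) :
    has_limp_shove_py_alt rows = true ↔
      ∃ a l, (collectB rows).get? a = some l ∧ replayTags l false = true := by
  have hnd : (collectB rows).keys.Nodup :=
    collect_nodup rows PySem.Dict.empty (by simp)
  unfold has_limp_shove_py_alt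
  rw [show (collectB rows).values = (collectB rows).items.map (·.2) from rfl]
  rw [List.any_map, List.any_eq_true]
  constructor
  · rintro ⟨⟨a, l⟩, hmem, hp⟩
    exact ⟨a, l, (PySem.Dict.get?_eq_some_iff_mem_items _ _ _ hnd).mpr hmem, hp⟩
  · rintro ⟨a, l, hget, hp⟩
    exact ⟨(a, l), (PySem.Dict.get?_eq_some_iff_mem_items _ _ _ hnd).mp hget, hp⟩

-- ===== VERDICT (by name: the statement is the Claim_ definition above) =====
theorem has_limp_shove_py_spec : Claim_equal_has_limp_shove_py := by
  intro rows _
  unfold Spec_has_limp_shove_py has_limp_shove_py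
  have hA := hlsGo_iff rows PySem.Dict.empty
  have hB := alt_iff rows
  have hget : ∀ a, (collectB rows).get? a =
      (if actsOf rows a = [] then none else some (actsOf rows a)) := by
    intro a
    have := collect_get? rows PySem.Dict.empty a
    simpa [collectB, PySem.Dict.get?_empty] using this
  rw [Bool.eq_iff_iff, hA, hB]
  constructor
  · rintro ⟨a, hrep⟩
    have hne : actsOf rows a ≠ [] := by
      intro hnil; rw [hnil] at hrep; simp [replayTags] at hrep
    refine ⟨a, actsOf rows a, ?_, ?_⟩
    · rw [hget a, if_neg hne]
    · simpa [PySem.Dict.get?_empty] using hrep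
  · rintro ⟨a, l, hgeta, hrep⟩
    rw [hget a] at hgeta
    by_cases hne : actsOf rows a = []
    · rw [if_pos hne] at hgeta; exact absurd hgeta (by simp)
    · rw [if_neg hne] at hgeta
      refine ⟨a, ?_⟩
      simpa [PySem.Dict.get?_empty, ← Option.some_inj.mp hgeta] using hrep
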